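-- pv_equiv track=rewrite | github.com/InosensiusKareloHesay/QuestionAnswerSystem_NER-and-Regex | QAS_PBA.py | entity
-- ===== SOURCE A (Python) =====
-- def entity(list):
--     ANIMAL = ["anjing", "kuda", "sapi", "bebek", "hiu", "penyu", "ikan", "kerbau", "cicak", "buaya", "katak",
--               "burung", "ayam", "kucing", "ular", "bekicot", "siput", "kerbau", "kelinci", "kangguru", "lebah", "kelelawar", "lintah", "cacing"]
--     BODY = ["rambut", "bulu", "sisik", "cangkang"]
--     LOCATION = ["air", "darat"]
--     FOOD = ["tumbuhan", "daging", "segalanya"]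
--     MOVE = ["berjalan", "melompat", "terbang", "berenang", "melata"]
--     ORGAN = ["insang", "paru", "kulit", "trakea"]
--     SEX = ["bertelur", "melahirkan"]
--     listBaru = []
--     for i in list:
--         if i in ANIMAL:
--             ner = "ANIMAL"
--         elif i in BODY:
--             ner = "BODY"
--         elif i in LOCATION:
--             ner = "LOCATION"
--         elif i in FOOD:
--             ner = "FOOD"
--         elif i in MOVE:
--             ner = "MOVE"
--         elif i in ORGAN:
--             ner = "ORGAN"
--         elif i in SEX:
--             ner = "SEX"
--         else:
--             ner = "O"
--         listBaru += [(i,ner)]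
--     return listBaru
-- ===== SOURCE B (Python) =====
-- def entity(list):
--     CATEGORIES = [
--         ("ANIMAL", ["anjing", "kuda", "sapi", "bebek", "hiu", "penyu", "ikan", "kerbau", "cicak", "buaya", "katak",
--                     "burung", "ayam", "kucing", "ular", "bekicot", "siput", "kerbau", "kelinci", "kangguru", "lebah", "kelelawar", "lintah", "cacing"]),
--         ("BODY", ["rambut", "bulu", "sisik", "cangkang"]),
--         ("LOCATION", ["air", "darat"]),
--         ("FOOD", ["tumbuhan", "daging", "segalanya"]),
--         ("MOVE", ["berjalan", "melompat", "terbang", "berenang", "melata"]),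
--         ("ORGAN", ["insang", "paru", "kulit", "trakea"]),
--         ("SEX", ["bertelur", "melahirkan"]),
--     ]
--     # staged passes: start with every token tagged "O"; for each category, sweep
--     # the whole token list and relabel its members.  Sweeping in reverse order
--     # makes earlier categories overwrite later ones, preserving A's precedence.
--     tags = ["O"] * len(list)
--     for tag, words in reversed(CATEGORIES):
--         for j, tok in enumerate(list):
--             if tok in words:
--                 tags[j] = tag
--     return [(tok, t) for tok, t in zip(list, tags)]
-- ===== Notes on version B (the rewrite author's own statement) =====
-- stated objective: alternative
-- what changed: Replaces the per-token 7-way if/elif membership cascade by a staged multi-pass algorithm: a tags array initialized to 'O' is rewritten by one full sweep per category (reversed order so earlier categories overwrite), then zipped with the tokens.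
import Mathlib
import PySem

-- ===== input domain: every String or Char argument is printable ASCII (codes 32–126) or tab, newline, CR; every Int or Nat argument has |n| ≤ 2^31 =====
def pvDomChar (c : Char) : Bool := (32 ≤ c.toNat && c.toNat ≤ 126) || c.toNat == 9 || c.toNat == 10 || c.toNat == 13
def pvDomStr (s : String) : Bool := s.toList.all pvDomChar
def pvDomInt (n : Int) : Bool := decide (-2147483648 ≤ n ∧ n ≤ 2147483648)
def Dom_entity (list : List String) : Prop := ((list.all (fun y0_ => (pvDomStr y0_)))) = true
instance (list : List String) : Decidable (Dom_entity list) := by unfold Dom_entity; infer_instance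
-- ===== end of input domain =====

-- B replaces the per-token 7-way if/elif cascade by staged passes: a tags array
-- initialized to "O" is relabeled by one sweep per category (reversed order so
-- earlier categories overwrite), then zipped with the tokens (same cost, different decomposition).

-- ===== PORT A =====
def pvANIMAL : List String := ["anjing", "kuda", "sapi", "bebek", "hiu", "penyu", "ikan", "kerbau", "cicak", "buaya", "katak", "burung", "ayam", "kucing", "ular", "bekicot", "siput", "kerbau", "kelinci", "kangguru", "lebah", "kelelawar", "lintah", "cacing"]
def pvBODY : List String := ["rambut", "bulu", "sisik", "cangkang"]
def pvLOCATION : List String := ["air", "darat"]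
def pvFOOD : List String := ["tumbuhan", "daging", "segalanya"]
def pvMOVE : List String := ["berjalan", "melompat", "terbang", "berenang", "melata"]
def pvORGAN : List String := ["insang", "paru", "kulit", "trakea"]
def pvSEX : List String := ["bertelur", "melahirkan"]

def pvNerOf (i : String) : String :=
  if pvANIMAL.contains i then "ANIMAL"
  else if pvBODY.contains i then "BODY"
  else if pvLOCATION.contains i then "LOCATION"
  else if pvFOOD.contains i then "FOOD"
  else if pvMOVE.contains i then "MOVE"
  else if pvORGAN.contains i then "ORGAN"
  else if pvSEX.contains i then "SEX"
  else "O"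

def entity (list : List String) : List (String × String) :=
  list.foldl (fun listBaru i => listBaru ++ [(i, pvNerOf i)]) []

-- ===== PORT B =====
def pvCATEGORIES : List (String × List String) :=
  [("ANIMAL", pvANIMAL), ("BODY", pvBODY), ("LOCATION", pvLOCATION),
   ("FOOD", pvFOOD), ("MOVE", pvMOVE), ("ORGAN", pvORGAN), ("SEX", pvSEX)]

-- one sweep per category: 'for j, tok in enumerate(list): if tok in words: tags[j] = tag'
-- rendered as a positionwise rewrite of the tags list alongside the token list
def entity_alt (list : List String) : List (String × String) :=
  list.zip (pvCATEGORIES.reverse.foldl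
    (fun tags p => (list.zip tags).map (fun q => if p.2.contains q.1 then p.1 else q.2))
    (list.map (fun _ => "O")))

-- ===== PRECONDITION & SPEC =====
def Spec_entity (list : List String) (out : List (String × String)) : Prop := out = entity_alt list
instance (list : List String) (out : List (String × String)) : Decidable (Spec_entity list out) := by unfold Spec_entity; infer_instance

-- ===== CLAIM =====
def Claim_equal_entity : Prop := ∀ (list : List String), Dom_entity list → Spec_entity list (entity list)

-- ===== LEMMAS AND PROOFS =====
def pvTagB (tok : String) : String :=
  pvCATEGORIES.reverse.foldl (fun t p => if p.2.contains tok then p.1 else t) "O"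

theorem pvZip_map_self {α β : Type} (xs : List α) (f : α → β) :
    xs.zip (xs.map f) = xs.map (fun x => (x, f x)) := by
  induction xs with
  | nil => rfl
  | cons x xs ih => simp [ih]

theorem pvStaged_pointwise (xs : List String) :
    ∀ (cats : List (String × List String)) (f : String → String),
      cats.foldl (fun tags p => (xs.zip tags).map (fun q => if p.2.contains q.1 then p.1 else q.2)) (xs.map f)
        = xs.map (fun tok => cats.foldl (fun t p => if p.2.contains tok then p.1 else t) (f tok)) := by
  intro cats
  induction cats with
  | nil => intro f; rfl
  | cons c cs ih =>
      intro f
      simp only [List.foldl_cons]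
      rw [pvZip_map_self, List.map_map]
      exact ih (fun tok => if c.2.contains tok then c.1 else f tok)

theorem pvTagB_eq_nerOf (tok : String) : pvTagB tok = pvNerOf tok := rfl

theorem pvEntity_foldl (acc : List (String × String)) (xs : List String) :
    xs.foldl (fun listBaru i => listBaru ++ [(i, pvNerOf i)]) acc
      = acc ++ xs.map (fun i => (i, pvNerOf i)) := by
  induction xs generalizing acc with
  | nil => simp
  | cons x xs ih => rw [List.foldl_cons, ih]; simp

-- ===== VERDICT =====
theorem entity_spec : Claim_equal_entity := by
  intro list _
  unfold Spec_entity entity entity_alt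
  rw [pvEntity_foldl, pvStaged_pointwise list pvCATEGORIES.reverse (fun _ => "O"),
    pvZip_map_self, List.nil_append]
  exact congrArg (fun f => List.map f list) (funext fun tok => congrArg (Prod.mk tok) (pvTagB_eq_nerOf tok).symm)
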